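-- pv_equiv track=rewrite | github.com/AMFTech512/austins-leetcode-solutions | problems/3 - Longest Substring Without Repeating Characters/substr.py | strWORepeats
-- ===== SOURCE A (Python) =====
-- def strWORepeats(str):
--     # create a list of characters, keep track of the count of consecutively unique characters
--     chars = {}
--     count = 0
--
--     # for each character in the string
--     for i in str:
--         # see if the current character is a duplicate
--         if i in chars:
--             chars[i]
--             # if it is, we can stop and return the current count of consecutively unique characters
--             return count
--         else:
--             # otherwise, add the character to our list in increase the count of consecutively unique characters
--             chars[i] = 1
--             count += 1
--     # if we reach the end without duplicate characters, return the count
--     return count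
-- ===== SOURCE B (Python) =====
-- def strWORepeats(str):
--     # Answer = index of the earliest SECOND occurrence of any character
--     # (or the full length when every character is unique): the longest
--     # duplicate-free prefix ends exactly where some character repeats
--     # for the first time, and that position is the minimum, over all
--     # characters, of the index of that character's second occurrence.
--     ans = len(str)
--     for c in set(str):
--         second = str.find(c, str.find(c) + 1)
--         if second != -1:
--             ans = min(ans, second)
--     return ans
-- ===== Notes on version B (the rewrite author's own statement) =====
-- stated objective: alternative
-- what changed: Replaced A's forward scan with a maintained seen-dict (stop at the first repeat) by a per-character analysis: for each distinct character take the index of its second occurrence via two find calls and return the minimum of those indices (or the length when none repeats).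
import Mathlib
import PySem

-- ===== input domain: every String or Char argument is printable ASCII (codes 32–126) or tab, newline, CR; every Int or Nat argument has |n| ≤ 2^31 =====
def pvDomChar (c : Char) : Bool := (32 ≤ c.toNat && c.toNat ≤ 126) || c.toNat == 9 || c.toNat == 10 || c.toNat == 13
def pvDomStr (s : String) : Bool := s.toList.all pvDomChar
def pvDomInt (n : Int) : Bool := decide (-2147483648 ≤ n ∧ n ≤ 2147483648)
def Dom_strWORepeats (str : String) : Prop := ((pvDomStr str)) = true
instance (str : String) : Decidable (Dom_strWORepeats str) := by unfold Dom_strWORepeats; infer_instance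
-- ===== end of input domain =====

-- B replaces A's forward scan with a seen-dict by a per-character minimum over second-occurrence indices (objective: alternative).


-- ===== PORT A =====
def strWORepeatsGo (cs : List Char) (chars : PySem.Dict Char Int) (count : Int) : Int :=
  match cs with
  | [] => count
  | c :: rest =>
      if chars.contains c then count
      else strWORepeatsGo rest (chars.insert c 1) (count + 1)

def strWORepeats (str : String) : Int := strWORepeatsGo str.toList PySem.Dict.empty 0

-- ===== PORT B =====
def strWORepeats_alt (str : String) : Int :=
  (PySem.Set.ofList str.toList).foldl
    (fun ans c =>
      let second := PySem.Chars.findFrom str.toList [c] (PySem.Chars.find str.toList [c] + 1) none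
      if second ≠ -1 then min ans second else ans)
    (str.toList.length : Int)

-- ===== PRECONDITION & SPEC =====
def Spec_strWORepeats (str : String) (out : Int) : Prop := out = strWORepeats_alt str
instance (str : String) (out : Int) : Decidable (Spec_strWORepeats str out) := by unfold Spec_strWORepeats; infer_instance

-- ===== CLAIM (what is proved, stated in full; the proofs are below) =====
def Claim_equal_strWORepeats : Prop := ∀ (str : String), Dom_strWORepeats str → Spec_strWORepeats str (strWORepeats str)

-- ===== LEMMAS AND PROOFS =====

-- proof-side helpers: the "first repeat position" scan and the repeat predicate
def firstRepAux (cs : List Char) (i : Nat) : Int :=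
  if h : i < cs.length then
    if cs[i] ∈ cs.take i then (i : Int) else firstRepAux cs (i + 1)
  else (cs.length : Int)
termination_by cs.length - i

def RepAt (cs : List Char) (j : Nat) : Prop := ∃ h : j < cs.length, cs[j] ∈ cs.take j

-- A's go equals the first-repeat scan (same proof shape as a prefix induction)
lemma strWORepeats_go_eq (rest pre : List Char) (chars : PySem.Dict Char Int)
    (hc : ∀ c, chars.contains c = decide (c ∈ pre)) :
    strWORepeatsGo rest chars (pre.length : Int) = firstRepAux (pre ++ rest) pre.length := by
  induction rest generalizing pre chars with
  | nil =>
      rw [firstRepAux]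
      simp [strWORepeatsGo]
  | cons c rest ih =>
      rw [firstRepAux]
      have hlt : pre.length < (pre ++ c :: rest).length := by simp
      rw [dif_pos hlt]
      have hget : (pre ++ c :: rest)[pre.length] = c := by
        simp [List.getElem_append_right]
      have htake : (pre ++ c :: rest).take pre.length = pre := by
        simp
      rw [hget, htake, strWORepeatsGo, hc]
      by_cases hm : c ∈ pre
      · simp [hm]
      · rw [if_neg hm]
        simp only [hm, decide_false, Bool.false_eq_true, if_false]
        have h1 : (pre.length : Int) + 1 = ((pre ++ [c]).length : Int) := by
          simp [List.length_append]
        have h2 : pre ++ c :: rest = (pre ++ [c]) ++ rest := by simp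
        have h3 : pre.length + 1 = (pre ++ [c]).length := by simp
        rw [h1, h2, h3]
        apply ih
        intro c'
        rw [PySem.Dict.contains_insert, hc]
        by_cases h : c' = c <;> simp [h, hm]

-- characterization of the scan
lemma firstRepAux_spec (cs : List Char) (i : Nat) :
    ∃ r : Nat, firstRepAux cs i = (r : Int) ∧ r ≤ cs.length ∧
      (∀ j, i ≤ j → j < r → ¬ RepAt cs j) ∧ (r = cs.length ∨ RepAt cs r) := by
  induction i using firstRepAux.induct cs with
  | case1 i h hmem =>
      refine ⟨i, by rw [firstRepAux]; simp [h, hmem], le_of_lt h, ?_, Or.inr ⟨h, hmem⟩⟩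
      intro j h1 h2; omega
  | case2 i h hmem ih =>
      obtain ⟨r, hr, hrl, hmin, hlast⟩ := ih
      refine ⟨r, by rw [firstRepAux]; simp [h, hmem, hr], hrl, ?_, hlast⟩
      intro j h1 h2
      rcases Nat.eq_or_lt_of_le h1 with rfl | h1'
      · rintro ⟨hj, hjm⟩; exact hmem hjm
      · exact hmin j h1' h2
  | case3 i h =>
      refine ⟨cs.length, by rw [firstRepAux]; simp [h], le_refl _, ?_, Or.inl rfl⟩
      intro j h1 h2; omega

-- singleton-prefix of a drop
lemma singleton_prefix_drop (cs : List Char) (c : Char) (j : Nat) :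
    [c] <+: cs.drop j ↔ ∃ h : j < cs.length, cs[j] = c := by
  constructor
  · intro hp
    have hj : j < cs.length := by
      by_contra hn
      rw [List.drop_eq_nil_of_le (by omega)] at hp
      simpa using hp.length_le
    rw [List.drop_eq_getElem_cons hj] at hp
    exact ⟨hj, ((List.cons_prefix_cons).mp hp).1.symm⟩
  · rintro ⟨hj, hc⟩
    rw [List.drop_eq_getElem_cons hj, hc]
    exact ⟨_, rfl⟩

-- the second-occurrence value computed by B for a character present in cs
def secIdx (cs : List Char) (c : Char) : Int :=
  PySem.Chars.findFrom cs [c] (PySem.Chars.find cs [c] + 1) none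

lemma infix_drop_of_prefix_drop (cs sub : List Char) (k j : Nat) (hkj : k ≤ j)
    (hp : sub <+: cs.drop j) : sub <:+: cs.drop k := by
  have he : cs.drop j = (cs.drop k).drop (j - k) := by
    rw [List.drop_drop]; congr 1; omega
  rw [he] at hp
  exact hp.isInfix.trans (List.drop_suffix _ _).isInfix

lemma singleton_infix_of_mem (cs : List Char) (c : Char) (hc : c ∈ cs) : [c] <:+: cs := by
  obtain ⟨j, hj, hcj⟩ := List.mem_iff_getElem.mp hc
  exact ((singleton_prefix_drop cs c j).mpr ⟨hj, hcj⟩).isInfix.trans (List.drop_suffix _ _).isInfix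

lemma secIdx_spec (cs : List Char) (c : Char) (hc : c ∈ cs) (h : secIdx cs c ≠ -1) :
    ∃ r : Nat, secIdx cs c = (r : Int) ∧ RepAt cs r ∧ ∃ hr : r < cs.length, cs[r] = c := by
  unfold secIdx at h ⊢
  have hf0 : 0 ≤ PySem.Chars.find cs [c] :=
    (PySem.Chars.find_nonneg_iff cs [c]).mpr (singleton_infix_of_mem cs c hc)
  obtain ⟨hpre, hmin0⟩ := PySem.Chars.find_spec hf0
  obtain ⟨hfl, hfc⟩ := (singleton_prefix_drop cs c _).mp hpre
  have hcast : PySem.Chars.find cs [c] + 1 = (((PySem.Chars.find cs [c]).toNat + 1 : Nat) : Int) := by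
    push_cast; rw [Int.toNat_of_nonneg hf0]
  rw [hcast] at h ⊢
  have hk : (PySem.Chars.find cs [c]).toNat + 1 ≤ cs.length := hfl
  obtain ⟨hle, hpre2, hmin⟩ := PySem.Chars.findFrom_natCast_spec cs [c] _ hk h
  set F := PySem.Chars.findFrom cs [c] (((PySem.Chars.find cs [c]).toNat + 1 : Nat) : Int) with hF
  have hF0 : 0 ≤ F := le_trans (by positivity) hle
  obtain ⟨hrl, hrc⟩ := (singleton_prefix_drop cs c F.toNat).mp hpre2
  have hltF : (PySem.Chars.find cs [c]).toNat < F.toNat := by omega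
  refine ⟨F.toNat, (Int.toNat_of_nonneg hF0).symm, ⟨hrl, ?_⟩, hrl, hrc⟩
  rw [hrc]
  exact List.mem_take_iff_getElem.mpr ⟨(PySem.Chars.find cs [c]).toNat, by omega, hfc⟩

lemma secIdx_min (cs : List Char) (c : Char) (j : Nat) (hj : j < cs.length)
    (hcj : cs[j] = c) (hrep : cs[j] ∈ cs.take j) : secIdx cs c ≠ -1 ∧ secIdx cs c ≤ (j : Int) := by
  rw [hcj] at hrep
  obtain ⟨i, him, hic⟩ := List.mem_take_iff_getElem.mp hrep
  have hij : i < j := by omega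
  have hinf : [c] <:+: cs := singleton_infix_of_mem cs c (List.mem_of_getElem hic)
  have hf0 : 0 ≤ PySem.Chars.find cs [c] := (PySem.Chars.find_nonneg_iff cs [c]).mpr hinf
  obtain ⟨hpre, hmin0⟩ := PySem.Chars.find_spec hf0
  have hpi : [c] <+: cs.drop i := (singleton_prefix_drop cs c i).mpr ⟨by omega, hic⟩
  have hfi : (PySem.Chars.find cs [c]).toNat ≤ i := by
    by_contra hn; exact hmin0 i (by omega) hpi
  have hpj : [c] <+: cs.drop j := (singleton_prefix_drop cs c j).mpr ⟨hj, hcj⟩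
  unfold secIdx
  have hcast : PySem.Chars.find cs [c] + 1 = (((PySem.Chars.find cs [c]).toNat + 1 : Nat) : Int) := by
    push_cast; rw [Int.toNat_of_nonneg hf0]
  rw [hcast]
  have hk : (PySem.Chars.find cs [c]).toNat + 1 ≤ cs.length := by omega
  have hne : PySem.Chars.findFrom cs [c] (((PySem.Chars.find cs [c]).toNat + 1 : Nat) : Int) ≠ -1 := by
    intro heq
    exact ((PySem.Chars.findFrom_natCast_eq_neg_one_iff cs [c] _ hk).mp heq)
      (infix_drop_of_prefix_drop cs [c] _ j (by omega) hpj)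
  obtain ⟨hle, hpre2, hmin⟩ := PySem.Chars.findFrom_natCast_spec cs [c] _ hk hne
  refine ⟨hne, ?_⟩
  set F := PySem.Chars.findFrom cs [c] (((PySem.Chars.find cs [c]).toNat + 1 : Nat) : Int) with hF
  have hF0 : 0 ≤ F := le_trans (by positivity) hle
  have : F.toNat ≤ j := by
    by_contra hn
    exact hmin j (by omega) (by omega) hpj
  omega

-- the fold is the min of acc and the defined secIdx values
lemma fold_min_spec (cs : List Char) (ds : List Char) (acc : Int) :
    (ds.foldl (fun ans c => if secIdx cs c ≠ -1 then min ans (secIdx cs c) else ans) acc) ≤ acc ∧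
    (∀ c ∈ ds, secIdx cs c ≠ -1 →
      (ds.foldl (fun ans c => if secIdx cs c ≠ -1 then min ans (secIdx cs c) else ans) acc) ≤ secIdx cs c) ∧
    ((ds.foldl (fun ans c => if secIdx cs c ≠ -1 then min ans (secIdx cs c) else ans) acc) = acc ∨
      ∃ c ∈ ds, secIdx cs c ≠ -1 ∧
        (ds.foldl (fun ans c => if secIdx cs c ≠ -1 then min ans (secIdx cs c) else ans) acc) = secIdx cs c) := by
  induction ds generalizing acc with
  | nil => exact ⟨le_refl _, by simp, Or.inl rfl⟩
  | cons d ds ih =>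
      simp only [List.foldl_cons]
      set acc' := if secIdx cs d ≠ -1 then min acc (secIdx cs d) else acc with hacc'
      obtain ⟨h1, h2, h3⟩ := ih acc'
      have hle : acc' ≤ acc := by
        rw [hacc']; split
        · exact min_le_left _ _
        · exact le_refl _
      refine ⟨le_trans h1 hle, ?_, ?_⟩
      · intro c hcmem hcne
        rcases List.mem_cons.mp hcmem with rfl | hcm
        · refine le_trans h1 ?_
          rw [hacc', if_pos hcne]
          exact min_le_right _ _
        · exact h2 c hcm hcne
      · rcases h3 with heq | ⟨c, hcm, hcne, heq⟩
        · rw [heq, hacc']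
          split
          · rename_i hd
            rcases min_choice acc (secIdx cs d) with hm | hm
            · exact Or.inl hm
            · exact Or.inr ⟨d, List.mem_cons_self, hd, hm⟩
          · exact Or.inl rfl
        · exact Or.inr ⟨c, List.mem_cons_of_mem _ hcm, hcne, heq⟩

-- ===== VERDICT (by name: the statement is the Claim_ definition above) =====
theorem strWORepeats_spec : Claim_equal_strWORepeats := by
  intro s _
  show strWORepeats s = strWORepeats_alt s
  set cs := s.toList with hcs
  have hA : strWORepeats s = firstRepAux cs 0 := by
    simpa [strWORepeats] using strWORepeats_go_eq cs [] PySem.Dict.empty (by simp)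
  obtain ⟨rA, hrA, hrAl, hmin, hlast⟩ := firstRepAux_spec cs 0
  have hB : strWORepeats_alt s =
      (PySem.Set.ofList cs).foldl (fun ans c => if secIdx cs c ≠ -1 then min ans (secIdx cs c) else ans)
        (cs.length : Int) := by
    simp only [strWORepeats_alt, secIdx, hcs]
  obtain ⟨f1, f2, f3⟩ := fold_min_spec cs (PySem.Set.ofList cs) (cs.length : Int)
  set M := (PySem.Set.ofList cs).foldl (fun ans c => if secIdx cs c ≠ -1 then min ans (secIdx cs c) else ans)
      (cs.length : Int) with hM
  rw [hA, hB, hrA]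
  have hMle : M ≤ (rA : Int) := by
    rcases hlast with rfl | ⟨hrl, hrm⟩
    · exact f1
    · obtain ⟨hne, hle⟩ := secIdx_min cs cs[rA] rA hrl rfl hrm
      have hcmem : cs[rA] ∈ PySem.Set.ofList cs :=
        (PySem.Set.mem_ofList cs _).mpr (List.getElem_mem hrl)
      exact le_trans (f2 _ hcmem hne) hle
  have hleM : (rA : Int) ≤ M := by
    rcases f3 with heq | ⟨c, hcm, hcne, heq⟩
    · rw [heq]; exact_mod_cast hrAl
    · have hcmem : c ∈ cs := (PySem.Set.mem_ofList cs c).mp hcm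
      obtain ⟨r, hr, hrep, _⟩ := secIdx_spec cs c hcmem hcne
      rw [heq, hr]
      have : rA ≤ r := by
        by_contra hn
        exact hmin r (Nat.zero_le _) (by omega) hrep
      exact_mod_cast this
  omega
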